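-- pv_equiv track=rewrite | github.com/lza6/claw-code-tingfeng | src/tools_runtime/edit_parser.py | replace_part_with_missing_leading_whitespace
-- ===== SOURCE A (Python) =====
-- def replace_part_with_missing_leading_whitespace(
--     chunks: list[str],
--     content_lines: list[str],
-- ) -> str | None:
--     """处理 LLM 去除公共前导空白的情况
--
--     当 LLM 生成的搜索文本缺少原始代码的缩进时，
--     通过比较 lstrip() 后的内容来匹配。
--
--     参数:
--         chunks: 要搜索的行列表
--         content_lines: 文件内容行列表
--
--     返回:
--         替换后的内容，或 None（未找到匹配）
--     """
--     if not chunks: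
--         return None
--
--     # 计算 chunks 的最小前导空白
--     leading = []
--     for line in chunks:
--         stripped = line.lstrip()
--         indent = len(line) - len(stripped)
--         if stripped:  # 跳过空行
--             leading.append(indent)
--
--     if not leading:
--         return None
--
--     # 检查所有缩进是否一致（允许 0 缩进的空行）
--     min_leading = min(leading)
--     has_inconsistent = False
--     for line in chunks:
--         stripped = line.lstrip()
--         if stripped:
--             indent = len(line) - len(stripped)
--             if indent != min_leading:
--                 has_inconsistent = True
--                 break
--
--     # 只有当所有非空行的缩进一致时才使用此策略
--     if has_inconsistent:
--         return None
--
--     # 去除公共前导空白后匹配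
--     stripped_chunks = [line[min_leading:] if line.strip() else line for line in chunks]
--
--     # 在 content 中查找 lstrip 后匹配的子序列
--     chunk_count = len(stripped_chunks)
--     for i in range(len(content_lines) - chunk_count + 1):
--         window = content_lines[i:i + chunk_count]
--         match = True
--         for _j, (sc, wl) in enumerate(zip(stripped_chunks, window, strict=False)):
--             if not sc.strip() and not wl.strip():
--                 continue  # 空行匹配空行
--             wl_stripped = wl.lstrip()
--             sc_stripped = sc.lstrip()
--             if wl_stripped != sc_stripped:
--                 match = False
--                 break
--         if match:
--             remaining = content_lines[:i] + content_lines[i + chunk_count:]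
--             return ''.join(remaining)
--
--     return None
-- ===== SOURCE B (Python) =====
-- def replace_part_with_missing_leading_whitespace(
--     chunks: list[str],
--     content_lines: list[str],
-- ) -> str | None:
--     """Fingerprint-filtered search instead of per-window pairwise comparison.
--
--     One pass over chunks builds the lstripped pattern while checking that all
--     non-blank lines share one indentation; the window scan then keeps a rolling
--     sum of per-line character-code fingerprints and compares actual lines only
--     when the fingerprint of the window equals the pattern's.
--     """
--     pat = []
--     indent = None
--     for line in chunks:
--         s = line.lstrip()
--         pat.append(s)
--         if s:
--             ind = len(line) - len(s)
--             if indent is None: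
--                 indent = ind
--             elif ind != indent:
--                 return None
--     if indent is None:
--         return None
--     keys = [l.lstrip() for l in content_lines]
--     vals = [sum(map(ord, s)) for s in keys]
--     target = sum(sum(map(ord, s)) for s in pat)
--     k = len(pat)
--     n = len(keys)
--     h = sum(vals[:k])
--     for i in range(n - k + 1):
--         if i:
--             h += vals[i + k - 1] - vals[i - 1]
--         if h == target and keys[i:i + k] == pat:
--             return ''.join(content_lines[:i] + content_lines[i + k:])
--     return None
-- ===== Notes on version B (the rewrite author's own statement) =====
-- stated objective: alternative
-- what changed: Replaces A's per-window pairwise lstrip-and-compare loop (with blank-line special cases) by a single chunk pass that builds the lstripped pattern while checking indent uniformity, then a rolling-sum fingerprint scan over precomputed per-line character-code sums, comparing actual lines only on fingerprint hits.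
import Mathlib
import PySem

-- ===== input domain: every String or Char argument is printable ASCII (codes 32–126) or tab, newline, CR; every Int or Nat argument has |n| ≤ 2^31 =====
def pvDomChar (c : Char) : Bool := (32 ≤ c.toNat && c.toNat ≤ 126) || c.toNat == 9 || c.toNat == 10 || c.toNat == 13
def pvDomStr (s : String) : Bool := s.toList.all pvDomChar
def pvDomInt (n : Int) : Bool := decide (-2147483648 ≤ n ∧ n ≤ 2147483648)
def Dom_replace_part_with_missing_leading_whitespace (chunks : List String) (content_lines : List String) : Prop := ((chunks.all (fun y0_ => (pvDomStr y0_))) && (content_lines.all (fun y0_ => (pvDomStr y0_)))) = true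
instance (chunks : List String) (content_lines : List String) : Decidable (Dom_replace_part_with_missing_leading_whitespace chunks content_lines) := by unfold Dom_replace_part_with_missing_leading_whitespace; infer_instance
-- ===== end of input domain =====

-- B replaces A's per-window pairwise lstrip-and-compare loop by one chunk pass building the
-- lstripped pattern (checking indent uniformity) plus a rolling-sum fingerprint scan that
-- compares the actual lines only when the window's fingerprint equals the pattern's.

-- ===== PORT A =====
def replace_part_with_missing_leading_whitespace (chunks : List String) (content_lines : List String) : Option String :=
  if chunks = [] then none
  else
    -- leading: indents of the non-blank (after lstrip) chunk lines
    let leading : List Int := chunks.foldl (fun acc line =>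
      let stripped := PySem.Str.lstrip line
      let indent : Int := PySem.Str.len line - PySem.Str.len stripped
      if stripped ≠ "" then acc ++ [indent] else acc) []
    if leading = [] then none
    else
      match PySem.List.min? leading (fun x => x) with
      | none => none
      | some min_leading =>
        let has_inconsistent := chunks.any (fun line =>
          let stripped := PySem.Str.lstrip line
          stripped ≠ "" && decide (PySem.Str.len line - PySem.Str.len stripped ≠ min_leading))
        if has_inconsistent then none
        else
          let stripped_chunks := chunks.map (fun line =>
            if PySem.Str.strip line ≠ "" then PySem.Str.slice line (some min_leading) none else line)
          let chunk_count : Int := (stripped_chunks.length : Int)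
          match (PySem.List.pyRange 0 ((content_lines.length : Int) - chunk_count + 1) 1).find? (fun i =>
            let window := PySem.List.slice content_lines (some i) (some (i + chunk_count))
            (stripped_chunks.zip window).all (fun p =>
              if PySem.Str.strip p.1 = "" && PySem.Str.strip p.2 = "" then true
              else PySem.Str.lstrip p.2 == PySem.Str.lstrip p.1)) with
          | none => none
          | some i => some (PySem.Str.join ""
              (PySem.List.slice content_lines none (some i) ++
               PySem.List.slice content_lines (some (i + chunk_count)) none))

-- ===== PORT B =====
-- fingerprint of a (lstripped) line: sum(map(ord, s))
def pvLineSum (s : String) : Int := (s.toList.map (fun c => (c.toNat : Int))).sum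

-- first pass over chunks: build the lstripped pattern, check indent uniformity
-- (none = Source B's early 'return None')
def pvChunkPass : List String → List String → Option Int → Option (List String × Option Int)
  | [], pat, indent => some (pat, indent)
  | line :: rest, pat, indent =>
    if PySem.Str.lstrip line ≠ "" then
      match indent with
      | none => pvChunkPass rest (pat ++ [PySem.Str.lstrip line])
          (some (PySem.Str.len line - PySem.Str.len (PySem.Str.lstrip line)))
      | some m =>
        if PySem.Str.len line - PySem.Str.len (PySem.Str.lstrip line) ≠ m then none
        else pvChunkPass rest (pat ++ [PySem.Str.lstrip line]) (some m)
    else pvChunkPass rest (pat ++ [PySem.Str.lstrip line]) indent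

-- the scan loop over i with the rolling fingerprint h
-- (vals[i+k-1] / vals[i-1] are always in range in Source B, so pyGetD is exact here)
def pvScan (content_lines keys : List String) (vals : List Int) (pat : List String)
    (target k : Int) : List Int → Int → Option String
  | [], _ => none
  | i :: rest, h =>
    let h' := if i ≠ 0 then h + (PySem.List.pyGetD vals (i + k - 1) 0 - PySem.List.pyGetD vals (i - 1) 0) else h
    if h' == target && PySem.List.slice keys (some i) (some (i + k)) == pat then
      some (PySem.Str.join "" (PySem.List.slice content_lines none (some i) ++
            PySem.List.slice content_lines (some (i + k)) none))
    else pvScan content_lines keys vals pat target k rest h'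

def replace_part_with_missing_leading_whitespace_alt (chunks : List String) (content_lines : List String) : Option String :=
  match pvChunkPass chunks [] none with
  | none => none
  | some (_, none) => none
  | some (pat, some _) =>
    let keys := content_lines.map PySem.Str.lstrip
    let vals := keys.map pvLineSum
    let target := (pat.map pvLineSum).sum
    let k : Int := (pat.length : Int)
    let n : Int := (keys.length : Int)
    pvScan content_lines keys vals pat target k (PySem.List.pyRange 0 (n - k + 1) 1)
      ((PySem.List.slice vals none (some k)).sum)

-- ===== PRECONDITION & SPEC =====
def Spec_replace_part_with_missing_leading_whitespace (chunks : List String) (content_lines : List String) (out : Option String) : Prop := out = replace_part_with_missing_leading_whitespace_alt chunks content_lines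
instance (chunks : List String) (content_lines : List String) (out : Option String) : Decidable (Spec_replace_part_with_missing_leading_whitespace chunks content_lines out) := by unfold Spec_replace_part_with_missing_leading_whitespace; infer_instance

-- ===== CLAIM (what is proved, stated in full; the proofs are below) =====
def Claim_equal_replace_part_with_missing_leading_whitespace : Prop := ∀ (chunks : List String) (content_lines : List String), Dom_replace_part_with_missing_leading_whitespace chunks content_lines → Spec_replace_part_with_missing_leading_whitespace chunks content_lines (replace_part_with_missing_leading_whitespace chunks content_lines)

-- ===== LEMMAS AND PROOFS =====


-- proof-only: the list of indents of the non-blank chunk lines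
def pvL (chunks : List String) : List Int :=
  (chunks.filter (fun l => decide (PySem.Str.lstrip l ≠ ""))).map
    (fun line => PySem.Str.len line - PySem.Str.len (PySem.Str.lstrip line))

theorem pvL_cons (a : String) (t : List String) :
    pvL (a :: t) = if PySem.Str.lstrip a ≠ "" then
      (PySem.Str.len a - PySem.Str.len (PySem.Str.lstrip a)) :: pvL t else pvL t := by
  by_cases h : PySem.Str.lstrip a ≠ "" <;> simp [pvL, List.filter_cons, h]

theorem pv_dropWhile_eq_drop (p : Char → Bool) (l : List Char) :
    l.dropWhile p = l.drop (l.takeWhile p).length := by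
  induction l with
  | nil => rfl
  | cons a t ih => by_cases h : p a <;> simp [h, ih]

theorem pv_dropWhile_head (p : Char → Bool) (l : List Char) (c : Char) (r : List Char)
    (h : l.dropWhile p = c :: r) : p c = false := by
  induction l with
  | nil => exact absurd h (by simp)
  | cons a t ih =>
    rw [List.dropWhile_cons] at h
    by_cases ha : p a = true
    · rw [if_pos ha] at h; exact ih h
    · rw [if_neg ha] at h
      cases h
      simpa using ha

theorem pv_lstrip_empty_iff (s : String) :
    PySem.Str.lstrip s = "" ↔ PySem.Chars.lstrip s.toList = [] := by
  rw [← String.toList_inj, PySem.Str.toList_lstrip]; rfl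

theorem pv_strip_empty_iff (s : String) :
    (PySem.Str.strip s = "") ↔ (PySem.Str.lstrip s = "") := by
  rw [pv_lstrip_empty_iff, ← String.toList_inj, PySem.Str.toList_strip]
  show PySem.Chars.strip s.toList = [] ↔ _
  unfold PySem.Chars.strip PySem.Chars.rstrip
  constructor
  · intro h
    cases hls : PySem.Chars.lstrip s.toList with
    | nil => rfl
    | cons c r =>
      exfalso
      rw [hls] at h
      have hall : ∀ x ∈ (c :: r).reverse, PySem.Chars.isspace x = true := by
        have := List.reverse_eq_nil_iff.mp h
        rw [List.dropWhile_eq_nil_iff] at this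
        exact this
      have hc : PySem.Chars.isspace c = true := hall c (by simp)
      unfold PySem.Chars.lstrip at hls
      have : PySem.Chars.isspace c = false := pv_dropWhile_head _ _ _ _ hls
      simp [this] at hc
  · intro h; rw [h]; rfl

theorem pv_lstrip_lstrip (s : String) :
    PySem.Str.lstrip (PySem.Str.lstrip s) = PySem.Str.lstrip s := by
  rw [← String.toList_inj, PySem.Str.toList_lstrip, PySem.Str.toList_lstrip]
  exact List.dropWhile_idempotent _ _

theorem pv_strip_lstrip (s : String) :
    PySem.Str.strip (PySem.Str.lstrip s) = PySem.Str.strip s := by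
  rw [← String.toList_inj, PySem.Str.toList_strip, PySem.Str.toList_strip]
  show PySem.Chars.strip (PySem.Str.lstrip s).toList = _
  rw [PySem.Str.toList_lstrip]
  unfold PySem.Chars.strip
  rw [show PySem.Chars.lstrip (PySem.Chars.lstrip s.toList) = PySem.Chars.lstrip s.toList from
    List.dropWhile_idempotent _ _]

def pvInd (l : String) : Int := PySem.Str.len l - PySem.Str.len (PySem.Str.lstrip l)

theorem pv_ind_nonneg (s : String) : 0 ≤ pvInd s := by
  unfold pvInd
  rw [PySem.Str.len_eq, PySem.Str.len_eq, PySem.Str.toList_lstrip]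
  have : (PySem.Chars.lstrip s.toList).length ≤ s.toList.length := by
    unfold PySem.Chars.lstrip
    exact List.length_dropWhile_le _ _
  omega

theorem pv_sc_eq (s : String) : PySem.Str.slice s (some (pvInd s)) none = PySem.Str.lstrip s := by
  rw [← String.toList_inj]
  show (String.ofList (PySem.Chars.slice s.toList (some (pvInd s)) none)).toList = _
  rw [String.toList_ofList, PySem.Chars.slice_eq_listSlice, PySem.Str.toList_lstrip,
    PySem.List.slice_from _ (pv_ind_nonneg s)]
  have hlen : (pvInd s).toNat = (s.toList.takeWhile PySem.Chars.isspace).length := by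
    unfold pvInd
    rw [PySem.Str.len_eq, PySem.Str.len_eq, PySem.Str.toList_lstrip]
    show ((s.toList.length : Int) - (PySem.Chars.lstrip s.toList).length).toNat = _
    unfold PySem.Chars.lstrip
    rw [pv_dropWhile_eq_drop, List.length_drop]
    have := congrArg List.length
      (List.takeWhile_append_dropWhile (p := PySem.Chars.isspace) (l := s.toList))
    rw [List.length_append] at this
    omega
  rw [hlen, ← pv_dropWhile_eq_drop]
  rfl

theorem pv_find?_congr {α : Type} (p q : α → Bool) (l : List α) (h : ∀ x ∈ l, p x = q x) :
    l.find? p = l.find? q := by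
  induction l with
  | nil => rfl
  | cons a t ih =>
    simp only [List.find?_cons, h a List.mem_cons_self]
    cases q a
    · exact ih fun x hx => h x (List.mem_cons_of_mem _ hx)
    · rfl

theorem pv_leadA (chunks : List String) (acc : List Int) :
    List.foldl
      (fun acc line =>
        if PySem.Str.lstrip line ≠ "" then acc ++ [PySem.Str.len line - PySem.Str.len (PySem.Str.lstrip line)]
        else acc) acc chunks
    = acc ++ pvL chunks := by
  induction chunks generalizing acc with
  | nil => simp only [pvL, List.foldl_nil, List.filter_nil, List.map_nil, List.append_nil]
  | cons a t ih =>
    simp only [List.foldl_cons]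
    rw [pvL_cons]
    by_cases h : PySem.Str.lstrip a ≠ ""
    · rw [if_pos h, if_pos h, ih]
      simp only [List.append_assoc, List.singleton_append]
    · rw [if_neg h, if_neg h, ih]

theorem pv_anyA (chunks : List String) (m : Int) :
    (chunks.any fun line =>
      decide (PySem.Str.lstrip line ≠ "") &&
        decide (PySem.Str.len line - PySem.Str.len (PySem.Str.lstrip line) ≠ m))
    = (pvL chunks).any (fun x => decide (x ≠ m)) := by
  unfold pvL
  rw [List.any_map, List.any_filter]
  simp only [Function.comp]

theorem pv_pair_eq (m : Int) (cl wl : String)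
    (h : PySem.Str.strip cl ≠ "" → PySem.Str.len cl - PySem.Str.len (PySem.Str.lstrip cl) = m) :
    (if (decide (PySem.Str.strip (if PySem.Str.strip cl ≠ "" then PySem.Str.slice cl (some m) else cl) = "") &&
          decide (PySem.Str.strip wl = "")) = true then true
     else PySem.Str.lstrip wl == PySem.Str.lstrip (if PySem.Str.strip cl ≠ "" then PySem.Str.slice cl (some m) else cl))
    = (PySem.Str.lstrip wl == PySem.Str.lstrip cl) := by
  by_cases hb : PySem.Str.strip cl = ""
  · rw [show (if PySem.Str.strip cl ≠ "" then PySem.Str.slice cl (some m) else cl) = cl from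
      if_neg (by simpa using hb)]
    have hcl : PySem.Str.lstrip cl = "" := (pv_strip_empty_iff cl).mp hb
    by_cases hw : PySem.Str.strip wl = ""
    · have hwl : PySem.Str.lstrip wl = "" := (pv_strip_empty_iff wl).mp hw
      simp [hb, hw, hcl, hwl]
    · simp [hb, hw]
  · rw [show (if PySem.Str.strip cl ≠ "" then PySem.Str.slice cl (some m) else cl) =
        PySem.Str.slice cl (some m) from if_pos hb]
    have hsc : PySem.Str.slice cl (some m) = PySem.Str.lstrip cl := by
      rw [← h hb]; exact pv_sc_eq cl
    rw [hsc, pv_strip_lstrip, pv_lstrip_lstrip]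
    simp [hb]

theorem pv_zipall (m : Int) (as : List String) : ∀ (ws : List String), ws.length = as.length →
    (∀ l ∈ as, PySem.Str.strip l ≠ "" → PySem.Str.len l - PySem.Str.len (PySem.Str.lstrip l) = m) →
    (((as.map (fun line => if PySem.Str.strip line ≠ "" then PySem.Str.slice line (some m) else line)).zip ws).all
      (fun p =>
        if (decide (PySem.Str.strip p.1 = "") && decide (PySem.Str.strip p.2 = "")) = true then true
        else PySem.Str.lstrip p.2 == PySem.Str.lstrip p.1))
    = (ws.map PySem.Str.lstrip == as.map PySem.Str.lstrip) := by
  induction as with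
  | nil =>
    intro ws hlen _
    have : ws = [] := List.length_eq_zero_iff.mp (by simpa using hlen)
    subst this
    rfl
  | cons a t ih =>
    intro ws hlen hcons
    cases ws with
    | nil => simp at hlen
    | cons w ws' =>
      simp only [List.map_cons, List.zip_cons_cons, List.all_cons, List.cons_beq_cons]
      rw [pv_pair_eq m a w (hcons a List.mem_cons_self)]
      rw [ih ws' (by simpa using hlen) (fun l hl => hcons l (List.mem_cons_of_mem _ hl))]

theorem pv_window_eq (chunks content : List String) (m : Int)
    (hcons : ∀ l ∈ chunks, PySem.Str.strip l ≠ "" → PySem.Str.len l - PySem.Str.len (PySem.Str.lstrip l) = m)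
    (i : Int) (h0 : 0 ≤ i) (hlt : i < (content.length : Int) - (chunks.length : Int) + 1) :
    (((chunks.map (fun line => if PySem.Str.strip line ≠ "" then PySem.Str.slice line (some m) else line)).zip
        (PySem.List.slice content (some i) (some (i + (chunks.length : Int))))).all
      (fun p =>
        if (decide (PySem.Str.strip p.1 = "") && decide (PySem.Str.strip p.2 = "")) = true then true
        else PySem.Str.lstrip p.2 == PySem.Str.lstrip p.1))
    = (PySem.List.slice (content.map PySem.Str.lstrip) (some i) (some (i + (chunks.length : Int))) ==
        chunks.map PySem.Str.lstrip) := by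
  obtain ⟨j, rfl⟩ : ∃ j : Nat, i = (j : Int) := ⟨i.toNat, (Int.toNat_of_nonneg h0).symm⟩
  have hjK : j + chunks.length ≤ content.length := by
    have := hlt
    omega
  rw [PySem.List.slice_natCast_add content j chunks.length,
      PySem.List.slice_natCast_add (content.map PySem.Str.lstrip) j chunks.length]
  rw [← List.map_drop, ← List.map_take]
  have hWlen : ((content.drop j).take chunks.length).length = chunks.length := by
    simp [List.length_take, List.length_drop]
    omega
  exact pv_zipall m chunks _ hWlen hcons

-- ----- B-side lemmas -----

theorem pv_cp_some (m : Int) : ∀ (chunks pat0 : List String),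
    (∀ x ∈ pvL chunks, x = m) →
    pvChunkPass chunks pat0 (some m) = some (pat0 ++ chunks.map PySem.Str.lstrip, some m) := by
  intro chunks
  induction chunks with
  | nil => intro pat0 _; simp [pvChunkPass]
  | cons a t ih =>
    intro pat0 hall
    rw [pvL_cons] at hall
    unfold pvChunkPass
    by_cases hs : PySem.Str.lstrip a ≠ ""
    · rw [if_pos hs]
      rw [if_pos hs] at hall
      have ha := hall _ List.mem_cons_self
      show (if PySem.Str.len a - PySem.Str.len (PySem.Str.lstrip a) ≠ m then none
            else pvChunkPass t (pat0 ++ [PySem.Str.lstrip a]) (some m)) = _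
      rw [if_neg (by simpa using ha)]
      rw [ih _ (fun x hx => hall x (List.mem_cons_of_mem _ hx))]
      simp
    · rw [if_neg hs]
      rw [if_neg hs] at hall
      rw [ih _ hall]
      simp

theorem pv_cp_none (m : Int) : ∀ (chunks pat0 : List String),
    (∀ x ∈ pvL chunks, x = m) →
    pvChunkPass chunks pat0 none = some (pat0 ++ chunks.map PySem.Str.lstrip,
      if pvL chunks = [] then none else some m) := by
  intro chunks
  induction chunks with
  | nil => intro pat0 _; simp [pvChunkPass, pvL]
  | cons a t ih =>
    intro pat0 hall
    rw [pvL_cons] at hall ⊢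
    unfold pvChunkPass
    by_cases hs : PySem.Str.lstrip a ≠ ""
    · rw [if_pos hs]
      rw [if_pos hs] at hall ⊢
      have ha := hall _ List.mem_cons_self
      show pvChunkPass t (pat0 ++ [PySem.Str.lstrip a])
          (some (PySem.Str.len a - PySem.Str.len (PySem.Str.lstrip a))) = _
      rw [ha, pv_cp_some m t _ (fun x hx => hall x (List.mem_cons_of_mem _ hx))]
      simp
    · rw [if_neg hs]
      rw [if_neg hs] at hall ⊢
      rw [ih _ hall]
      simp

theorem pv_cp_some_none (m : Int) : ∀ (chunks pat0 : List String),
    (∃ x ∈ pvL chunks, x ≠ m) →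
    pvChunkPass chunks pat0 (some m) = none := by
  intro chunks
  induction chunks with
  | nil => rintro pat0 ⟨x, hx, -⟩; simp [pvL] at hx
  | cons a t ih =>
    rintro pat0 ⟨x, hx, hxm⟩
    rw [pvL_cons] at hx
    unfold pvChunkPass
    by_cases hs : PySem.Str.lstrip a ≠ ""
    · rw [if_pos hs]
      rw [if_pos hs] at hx
      show (if PySem.Str.len a - PySem.Str.len (PySem.Str.lstrip a) ≠ m then none
            else pvChunkPass t (pat0 ++ [PySem.Str.lstrip a]) (some m)) = none
      by_cases ha : PySem.Str.len a - PySem.Str.len (PySem.Str.lstrip a) ≠ m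
      · rw [if_pos ha]
      · rw [if_neg ha]
        apply ih
        rcases List.mem_cons.mp hx with rfl | hx
        · exact absurd (by simpa using ha) hxm
        · exact ⟨x, hx, hxm⟩
    · rw [if_neg hs]
      rw [if_neg hs] at hx
      exact ih _ ⟨x, hx, hxm⟩

theorem pv_cp_none_none : ∀ (chunks pat0 : List String),
    (∃ x ∈ pvL chunks, ∃ y ∈ pvL chunks, x ≠ y) →
    pvChunkPass chunks pat0 none = none := by
  intro chunks
  induction chunks with
  | nil => rintro pat0 ⟨x, hx, -⟩; simp [pvL] at hx
  | cons a t ih =>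
    rintro pat0 ⟨x, hx, y, hy, hxy⟩
    rw [pvL_cons] at hx hy
    unfold pvChunkPass
    by_cases hs : PySem.Str.lstrip a ≠ ""
    · rw [if_pos hs]
      rw [if_pos hs] at hx hy
      show pvChunkPass t (pat0 ++ [PySem.Str.lstrip a])
          (some (PySem.Str.len a - PySem.Str.len (PySem.Str.lstrip a))) = none
      apply pv_cp_some_none
      rcases List.mem_cons.mp hx with rfl | hx
      · rcases List.mem_cons.mp hy with rfl | hy
        · exact absurd rfl hxy
        · exact ⟨y, hy, fun h => hxy h.symm⟩
      · rcases List.mem_cons.mp hy with rfl | hy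
        · exact ⟨x, hx, hxy⟩
        · by_cases hxa : x = PySem.Str.len a - PySem.Str.len (PySem.Str.lstrip a)
          · exact ⟨y, hy, fun h => hxy (hxa.trans h.symm)⟩
          · exact ⟨x, hx, hxa⟩
    · rw [if_neg hs]
      rw [if_neg hs] at hx hy
      exact ih _ ⟨x, hx, y, hy, hxy⟩

-- window fingerprint (sum of vals over keys[j:j+kN])
def pvWH (vals : List Int) (kN j : Nat) : Int := ((vals.drop j).take kN).sum

theorem pv_roll (vals : List Int) (kN j : Nat) (hk : 1 ≤ kN) (hlt : j + kN < vals.length) :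
    pvWH vals kN (j+1) = pvWH vals kN j + vals.getD (j + kN) 0 - vals.getD j 0 := by
  unfold pvWH
  have hj : j < vals.length := by omega
  obtain ⟨k', rfl⟩ : ∃ k', kN = k' + 1 := ⟨kN - 1, by omega⟩
  rw [List.drop_eq_getElem_cons hj, List.take_succ_cons, List.take_succ]
  have hget : (vals.drop (j+1))[k']? = some vals[j + (k'+1)] := by
    rw [List.getElem?_drop, List.getElem?_eq_getElem (by omega)]
    exact congrArg some (getElem_congr_idx (by omega))
  rw [hget]
  have h1 : vals.getD (j + (k'+1)) 0 = vals[j + (k'+1)] := List.getD_eq_getElem _ _ (by omega)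
  have h2 : vals.getD j 0 = vals[j] := List.getD_eq_getElem _ _ hj
  rw [h1, h2]
  simp only [Option.toList_some, List.sum_append, List.sum_cons, List.sum_nil]
  ring

theorem pv_absorb (keys pat : List String) (j kN : Nat) (hp : pat.length = kN)
    (h : (keys.drop j).take kN = pat) :
    pvWH (keys.map pvLineSum) kN j = (pat.map pvLineSum).sum := by
  unfold pvWH
  rw [← List.map_drop, ← List.map_take, h]

theorem pv_scan_eq (content keys pat : List String) (kN : Nat) (hk : 1 ≤ kN)
    (hp : pat.length = kN) :
    ∀ (c : Nat) (a h : Int), 0 ≤ a →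
    (((keys.length : Int) - (kN : Int) + 1 - a).toNat = c) →
    (a = 0 → h = pvWH (keys.map pvLineSum) kN 0) →
    (1 ≤ a → h = pvWH (keys.map pvLineSum) kN (a - 1).toNat) →
    pvScan content keys (keys.map pvLineSum) pat ((pat.map pvLineSum).sum) (kN : Int)
        (PySem.List.pyRange a ((keys.length : Int) - (kN : Int) + 1) 1) h
    = match (PySem.List.pyRange a ((keys.length : Int) - (kN : Int) + 1) 1).find?
        (fun i => PySem.List.slice keys (some i) (some (i + (kN : Int))) == pat) with
      | none => none
      | some i => some (PySem.Str.join "" (PySem.List.slice content none (some i) ++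
          PySem.List.slice content (some (i + (kN : Int))) none)) := by
  intro c
  induction c with
  | zero =>
    intro a h h0a hc h00 h01
    rw [PySem.List.pyRange_one_eq_nil (by omega)]
    rfl
  | succ c ih =>
    intro a h h0a hc h00 h01
    have hab : a < (keys.length : Int) - (kN : Int) + 1 := by omega
    rw [PySem.List.pyRange_one_cons hab]
    have hlen : (keys.map pvLineSum).length = keys.length := List.length_map ..
    have hh' : (if a ≠ 0 then h + (PySem.List.pyGetD (keys.map pvLineSum) (a + (kN : Int) - 1) 0 -
          PySem.List.pyGetD (keys.map pvLineSum) (a - 1) 0) else h)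
        = pvWH (keys.map pvLineSum) kN a.toNat := by
      by_cases ha0 : a = 0
      · subst ha0
        rw [if_neg (by simp)]
        simpa using h00 rfl
      · rw [if_pos ha0]
        have ha1 : 1 ≤ a := by omega
        have hja : a - 1 = (((a - 1).toNat : Nat) : Int) := by omega
        have h2 : PySem.List.pyGetD (keys.map pvLineSum) (a - 1) 0
            = (keys.map pvLineSum).getD (a - 1).toNat 0 := by
          rw [hja, PySem.List.pyGetD_natCast]
          simp
        have h1 : PySem.List.pyGetD (keys.map pvLineSum) (a + (kN : Int) - 1) 0
            = (keys.map pvLineSum).getD ((a - 1).toNat + kN) 0 := by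
          rw [show a + (kN : Int) - 1 = ((((a - 1).toNat + kN : Nat)) : Int) by omega,
            PySem.List.pyGetD_natCast]
        rw [h1, h2, h01 ha1]
        have hroll := pv_roll (keys.map pvLineSum) kN (a - 1).toNat hk (by rw [hlen]; omega)
        rw [show a.toNat = (a - 1).toNat + 1 by omega, hroll]
        ring
    simp only [pvScan]
    rw [hh']
    by_cases he : (PySem.List.slice keys (some a) (some (a + (kN : Int))) == pat) = true
    · have heq : PySem.List.slice keys (some a) (some (a + (kN : Int))) = pat := by
        exact eq_of_beq he
      have hdt : (keys.drop a.toNat).take kN = pat := by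
        rw [show a = ((a.toNat : Nat) : Int) by omega,
          PySem.List.slice_natCast_add keys a.toNat kN] at heq
        exact heq
      have hWa : pvWH (keys.map pvLineSum) kN a.toNat = (pat.map pvLineSum).sum :=
        pv_absorb keys pat a.toNat kN hp hdt
      rw [if_pos (by rw [hWa, heq]; simp)]
      rw [List.find?_cons_of_pos (p := fun i => PySem.List.slice keys (some i) (some (i + (kN : Int))) == pat) he]
    · have he' : (PySem.List.slice keys (some a) (some (a + (kN : Int))) == pat) = false :=
        Bool.not_eq_true _ ▸ (by simpa using he)
      rw [if_neg (by rw [he']; simp)]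
      rw [List.find?_cons_of_neg (p := fun i => PySem.List.slice keys (some i) (some (i + (kN : Int))) == pat) (by simp [he'])]
      exact ih (a + 1) _ (by omega) (by omega) (by omega) (fun _ => by
        rw [show a + 1 - 1 = a by ring])


-- ===== VERDICT (by name: the statement is the Claim_ definition above) =====
theorem replace_part_with_missing_leading_whitespace_spec : Claim_equal_replace_part_with_missing_leading_whitespace := by
  intro chunks content _
  unfold Spec_replace_part_with_missing_leading_whitespace
  unfold replace_part_with_missing_leading_whitespace replace_part_with_missing_leading_whitespace_alt
  simp only []
  by_cases hc : chunks = []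
  · subst hc
    simp [pvChunkPass]
  · rw [if_neg hc]
    rw [pv_leadA chunks [], List.nil_append]
    by_cases hF : pvL chunks = []
    · rw [if_pos hF]
      rw [pv_cp_none 0 chunks [] (by rw [hF]; simp)]
      simp [hF]
    · rw [if_neg hF]
      cases hmin : PySem.List.min? (pvL chunks) (fun x => x) with
      | none => exact absurd ((PySem.List.min?_eq_none_iff _ _).mp hmin) hF
      | some m =>
        simp only []
        by_cases hinc : ∀ x ∈ pvL chunks, x = m
        · -- consistent indentation
          rw [pv_anyA]
          rw [if_neg (by
            rw [List.any_eq_true]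
            rintro ⟨x, hx, hdx⟩
            exact absurd (hinc x hx) (of_decide_eq_true hdx))]
          rw [pv_cp_none m chunks [] hinc, List.nil_append]
          rw [if_neg hF]
          simp only [List.length_map]
          have hcons : ∀ l ∈ chunks, PySem.Str.strip l ≠ "" →
              PySem.Str.len l - PySem.Str.len (PySem.Str.lstrip l) = m := by
            intro l hl hs
            apply hinc
            unfold pvL
            exact List.mem_map_of_mem (List.mem_filter.mpr
              ⟨hl, decide_eq_true ((not_iff_not.mpr (pv_strip_empty_iff l)).mp hs)⟩)
          rw [pv_find?_congr _ _ _ (fun i hi => by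
            obtain ⟨h0, hlt⟩ := PySem.List.mem_pyRange_one.mp hi
            exact pv_window_eq chunks content m hcons i h0 hlt)]
          have hk : 1 ≤ chunks.length := by
            cases chunks with
            | nil => exact absurd rfl hc
            | cons _ _ => simp
          have hscan := pv_scan_eq content (content.map PySem.Str.lstrip)
            (chunks.map PySem.Str.lstrip) chunks.length hk (List.length_map ..)
            (((content.map PySem.Str.lstrip).length : Int) - (chunks.length : Int) + 1 - 0).toNat
            0 ((PySem.List.slice ((content.map PySem.Str.lstrip).map pvLineSum) none
                (some ((chunks.length : Nat) : Int))).sum)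
            le_rfl rfl
            (fun _ => by
              rw [PySem.List.slice_to_natCast]
              unfold pvWH
              rw [List.drop_zero])
            (fun habs => by omega)
          simp only [List.length_map] at hscan
          rw [hscan]
        · -- inconsistent indentation: both sides none
          rw [pv_anyA]
          push_neg at hinc
          obtain ⟨x, hx, hxm⟩ := hinc
          rw [if_pos (by
            rw [List.any_eq_true]
            exact ⟨x, hx, decide_eq_true hxm⟩)]
          rw [pv_cp_none_none chunks []
            ⟨x, hx, m, PySem.List.min?_mem hmin, hxm⟩]
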